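-- pv_equiv track=rewrite | github.com/chadrick-kwag/hubmap | data_prep/slice_dataset_v2.py | get_grid_coords
-- ===== SOURCE A (Python) =====
-- def get_grid_coords(img_w, img_h, slice_w, slice_h):
--
--     slice_x_start_list=[]
--     slice_x_end_list = []
--
--
--     slice_w_num = img_w// slice_w
--
--
--     for i in range(slice_w_num):
--
--         slice_x_start = slice_w * i
--         slice_x_end = slice_w * (i+1)
--
--         if slice_x_end > img_w:
--             slice_x_end = img_w
--             slice_x_start = slice_x_end - slice_w
--
--         slice_x_start_list.append(slice_x_start)
--         slice_x_end_list.append(slice_x_end)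
--
--
--     slice_y_start_list = []
--     slice_y_end_list = []
--
--     slice_h_num = img_h // slice_h
--
--     for i in range(slice_h_num):
--
--         slice_y_start = slice_h * i
--         slice_y_end = slice_h * (i+1)
--
--         if slice_y_end > img_h:
--             slice_y_end = img_h
--             slice_y_start = slice_y_end - slice_h
--
--         slice_y_start_list.append(slice_y_start)
--         slice_y_end_list.append(slice_y_end)
--
--     grid_coord_list =[]
--
--     for slice_x_start, slice_x_end in zip(slice_x_start_list, slice_x_end_list):
--         for slice_y_start, slice_y_end in zip(slice_y_start_list, slice_y_end_list):
--
--             grid_coord_list.append([slice_x_start, slice_y_start, slice_x_end, slice_y_end])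
--
--     return grid_coord_list
-- ===== SOURCE B (Python) =====
-- def get_grid_coords(img_w, img_h, slice_w, slice_h):
--     nx = img_w // slice_w
--     ny = img_h // slice_h
--     if nx <= 0 or ny <= 0:
--         return []
--     out = []
--     for k in range(nx * ny):
--         i, j = divmod(k, ny)
--         out.append([slice_w * i, slice_h * j, slice_w * (i + 1), slice_h * (j + 1)])
--     return out
-- ===== Notes on version B (the rewrite author's own statement) =====
-- stated objective: alternative
-- what changed: A's three staged passes (x boundary lists, y boundary lists, nested zip combine) are replaced by a single flat loop over one linear index k in range(nx*ny) that decodes the cell as (i, j) = divmod(k, ny), so no intermediate boundary lists and no nested loops exist at all.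
-- intended difference: On inputs with a negative slice width/height strictly greater (in value) than the corresponding negative image dimension, A's clamp branch fires and returns duplicated wrapped tiles all clamped to the image edge (e.g. A(-5,4,-2,2) repeats [-3,0,-5,2]), while B returns the plain non-overlapping grid, which is the intended tiling. — e.g. on get_grid_coords(-5, 4, -2, 2): A returns [[-3, 0, -5, 2], [-3, 2, -5, 4], [-3, 0, -5, 2], [-3, 2, -5, 4]], B returns [[0, 0, -2, 2], [0, 2, -2, 4], [-2, 0, -4, 2], [-2, 2, -4, 4]]
import Mathlib
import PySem

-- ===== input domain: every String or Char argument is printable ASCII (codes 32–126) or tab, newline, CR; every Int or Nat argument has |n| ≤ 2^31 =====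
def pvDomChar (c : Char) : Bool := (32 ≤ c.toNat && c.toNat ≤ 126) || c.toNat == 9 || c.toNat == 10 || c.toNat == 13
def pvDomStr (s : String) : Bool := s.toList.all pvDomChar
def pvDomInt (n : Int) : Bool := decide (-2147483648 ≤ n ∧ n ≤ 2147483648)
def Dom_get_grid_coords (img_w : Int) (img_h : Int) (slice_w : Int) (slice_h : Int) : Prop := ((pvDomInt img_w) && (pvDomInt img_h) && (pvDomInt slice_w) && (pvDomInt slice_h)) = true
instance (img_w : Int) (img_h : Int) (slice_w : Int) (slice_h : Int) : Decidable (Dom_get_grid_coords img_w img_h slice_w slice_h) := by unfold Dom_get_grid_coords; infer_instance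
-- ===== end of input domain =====

-- B replaces A's three staged passes (x/y boundary lists, nested zip combine) with a single flat
-- loop over one linear index decoded by divmod; on negative slice sizes A's clamp wraps tiles (D_ below).

-- ===== PORT A =====
-- A-side helper: the body of A's x/y boundary-list loop (append start/end, clamping past the edge)
def pvGridStep (bound step : Int) (acc : List Int × List Int) (i : Int) : List Int × List Int :=
  let s := step * i
  let e := step * (i + 1)
  let p := if e > bound then (bound - step, bound) else (s, e)
  (acc.1 ++ [p.1], acc.2 ++ [p.2])

def get_grid_coords (img_w : Int) (img_h : Int) (slice_w : Int) (slice_h : Int) : List (List Int) :=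
  let slice_w_num := PySem.Int.floordiv img_w slice_w
  let xp := (PySem.List.pyRange 0 slice_w_num 1).foldl (pvGridStep img_w slice_w) ([], [])
  let slice_h_num := PySem.Int.floordiv img_h slice_h
  let yp := (PySem.List.pyRange 0 slice_h_num 1).foldl (pvGridStep img_h slice_h) ([], [])
  (xp.1.zip xp.2).foldl
    (fun acc p => (yp.1.zip yp.2).foldl (fun a2 q => a2 ++ [[p.1, q.1, p.2, q.2]]) acc) []

-- ===== PORT B =====
def get_grid_coords_alt (img_w : Int) (img_h : Int) (slice_w : Int) (slice_h : Int) : List (List Int) :=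
  let nx := PySem.Int.floordiv img_w slice_w
  let ny := PySem.Int.floordiv img_h slice_h
  if nx ≤ 0 ∨ ny ≤ 0 then []
  else
    (PySem.List.pyRange 0 (nx * ny) 1).foldl
      (fun out k =>
        let i := PySem.Int.floordiv k ny
        let j := PySem.Int.mod k ny
        out ++ [[slice_w * i, slice_h * j, slice_w * (i + 1), slice_h * (j + 1)]]) []

-- ===== PRECONDITION & SPEC =====
-- A raises ZeroDivisionError when slice_w = 0 or slice_h = 0; those inputs are excluded.
def Pre_get_grid_coords (img_w : Int) (img_h : Int) (slice_w : Int) (slice_h : Int) : Prop :=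
  slice_w ≠ 0 ∧ slice_h ≠ 0
instance (img_w : Int) (img_h : Int) (slice_w : Int) (slice_h : Int) : Decidable (Pre_get_grid_coords img_w img_h slice_w slice_h) := by unfold Pre_get_grid_coords; infer_instance

def pvWitness_get_grid_coords : Int × Int × Int × Int := (6, 4, 2, 2)

-- On inputs with a negative slice width/height strictly greater (in value) than the corresponding
-- negative image dimension, A's clamp branch fires and returns duplicated tiles all clamped to the
-- image edge, while B returns the plain non-overlapping grid, which is the intended tiling.
def D_get_grid_coords (img_w : Int) (img_h : Int) (slice_w : Int) (slice_h : Int) : Prop :=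
  (1 ≤ PySem.Int.floordiv img_w slice_w ∧ 1 ≤ PySem.Int.floordiv img_h slice_h) ∧
  ((slice_w < 0 ∧ img_w < slice_w) ∨ (slice_h < 0 ∧ img_h < slice_h))
instance (img_w : Int) (img_h : Int) (slice_w : Int) (slice_h : Int) : Decidable (D_get_grid_coords img_w img_h slice_w slice_h) := by unfold D_get_grid_coords; infer_instance

def Spec_get_grid_coords (img_w : Int) (img_h : Int) (slice_w : Int) (slice_h : Int) (out : List (List Int)) : Prop := ¬ D_get_grid_coords img_w img_h slice_w slice_h → out = get_grid_coords_alt img_w img_h slice_w slice_h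
instance (img_w : Int) (img_h : Int) (slice_w : Int) (slice_h : Int) (out : List (List Int)) : Decidable (Spec_get_grid_coords img_w img_h slice_w slice_h out) := by unfold Spec_get_grid_coords; infer_instance

def pvDiffWitness_get_grid_coords : Int × Int × Int × Int := (-5, 4, -2, 2)
def pvDiffWitnessOut_get_grid_coords : (List (List Int)) × (List (List Int)) :=
  ([[-3, 0, -5, 2], [-3, 2, -5, 4], [-3, 0, -5, 2], [-3, 2, -5, 4]],
   [[0, 0, -2, 2], [0, 2, -2, 4], [-2, 0, -4, 2], [-2, 2, -4, 4]])

-- ===== CLAIM (what is proved, stated in full; the proofs are below) =====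
def Claim_unchanged_get_grid_coords : Prop := ∀ (img_w : Int) (img_h : Int) (slice_w : Int) (slice_h : Int), Dom_get_grid_coords img_w img_h slice_w slice_h → Pre_get_grid_coords img_w img_h slice_w slice_h → Spec_get_grid_coords img_w img_h slice_w slice_h (get_grid_coords img_w img_h slice_w slice_h)
def Claim_changed_get_grid_coords : Prop := Dom_get_grid_coords (pvDiffWitness_get_grid_coords.1) (pvDiffWitness_get_grid_coords.2.1) (pvDiffWitness_get_grid_coords.2.2.1) (pvDiffWitness_get_grid_coords.2.2.2) ∧ Pre_get_grid_coords (pvDiffWitness_get_grid_coords.1) (pvDiffWitness_get_grid_coords.2.1) (pvDiffWitness_get_grid_coords.2.2.1) (pvDiffWitness_get_grid_coords.2.2.2) ∧ D_get_grid_coords (pvDiffWitness_get_grid_coords.1) (pvDiffWitness_get_grid_coords.2.1) (pvDiffWitness_get_grid_coords.2.2.1) (pvDiffWitness_get_grid_coords.2.2.2) ∧ get_grid_coords (pvDiffWitness_get_grid_coords.1) (pvDiffWitness_get_grid_coords.2.1) (pvDiffWitness_get_grid_coords.2.2.1) (pvDiffWitness_get_grid_coords.2.2.2) = pvDiffWitnessOut_get_grid_coords.1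 ∧ get_grid_coords_alt (pvDiffWitness_get_grid_coords.1) (pvDiffWitness_get_grid_coords.2.1) (pvDiffWitness_get_grid_coords.2.2.1) (pvDiffWitness_get_grid_coords.2.2.2) = pvDiffWitnessOut_get_grid_coords.2 ∧ pvDiffWitnessOut_get_grid_coords.1 ≠ pvDiffWitnessOut_get_grid_coords.2
def Claim_exact_get_grid_coords : Prop := ∀ (img_w : Int) (img_h : Int) (slice_w : Int) (slice_h : Int), Dom_get_grid_coords img_w img_h slice_w slice_h → Pre_get_grid_coords img_w img_h slice_w slice_h → D_get_grid_coords img_w img_h slice_w slice_h → get_grid_coords img_w img_h slice_w slice_h ≠ get_grid_coords_alt img_w img_h slice_w slice_h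

-- ===== LEMMAS AND PROOFS =====

-- the (start, end) pair A's boundary loop records for index i
def pvF (bound step : Int) (i : Int) : Int × Int :=
  if step * (i + 1) > bound then (bound - step, bound) else (step * i, step * (i + 1))

theorem foldl_gridStep (bound step : Int) (r : List Int) (a b : List Int) :
    r.foldl (pvGridStep bound step) (a, b)
      = (a ++ r.map (fun i => (pvF bound step i).1), b ++ r.map (fun i => (pvF bound step i).2)) := by
  induction r generalizing a b with
  | nil => simp
  | cons x xs ih =>
      simp only [List.foldl_cons, List.map_cons]
      rw [show pvGridStep bound step (a, b) x
            = (a ++ [(pvF bound step x).1], b ++ [(pvF bound step x).2]) from rfl, ih]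
      simp

theorem combineLoop (yp : List (Int × Int)) (xp : List (Int × Int)) (acc : List (List Int)) :
    xp.foldl (fun acc p => yp.foldl (fun a2 q => a2 ++ [[p.1, q.1, p.2, q.2]]) acc) acc
      = acc ++ xp.flatMap (fun p => yp.map fun q => [p.1, q.1, p.2, q.2]) := by
  induction xp generalizing acc with
  | nil => simp
  | cons x xs ih =>
      simp only [List.foldl_cons, PySem.List.foldl_append_singleton_eq_map,
        List.flatMap_cons]
      simp [List.flatMap]

-- A as a flatMap over the two index ranges, of the clamped pairs
theorem get_grid_coords_eq_flatMap (w h sw sh : Int) :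
    get_grid_coords w h sw sh
      = (PySem.List.pyRange 0 (PySem.Int.floordiv w sw) 1).flatMap fun i =>
          (PySem.List.pyRange 0 (PySem.Int.floordiv h sh) 1).map fun j =>
            [(pvF w sw i).1, (pvF h sh j).1, (pvF w sw i).2, (pvF h sh j).2] := by
  simp only [get_grid_coords, foldl_gridStep, List.nil_append, List.zip_map', combineLoop,
    List.flatMap_map, List.map_map]
  rfl

-- decoding a flat index: over k ∈ [0, n*ny) the pair (k // ny, k % ny) runs through the grid row-major
theorem grid_flat (ny : Int) (hny : 0 < ny) (f : Int → Int → List Int) (n : Nat) :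
    (PySem.List.pyRange 0 ((n : Int) * ny) 1).map
        (fun k => f (PySem.Int.floordiv k ny) (PySem.Int.mod k ny))
      = (PySem.List.pyRange 0 (n : Int) 1).flatMap fun i =>
          (PySem.List.pyRange 0 ny 1).map fun j => f i j := by
  induction n with
  | zero => simp [PySem.List.pyRange_one_eq_nil]
  | succ m ih =>
      have h1 : (0 : Int) ≤ (m : Int) * ny := by positivity
      rw [show ((m + 1 : Nat) : Int) = (m : Int) + 1 by push_cast; ring,
          PySem.List.pyRange_one_succ_right (by positivity),
          show ((m : Int) + 1) * ny = (m : Int) * ny + ny by ring,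
          PySem.List.pyRange_one_append 0 ((m : Int) * ny) ((m : Int) * ny + ny) h1 (by omega),
          List.map_append, ih, List.flatMap_append, List.flatMap_singleton]
      congr 1
      rw [PySem.List.pyRange_one, PySem.List.pyRange_one 0 ny]
      simp only [List.map_map, show (m : Int) * ny + ny - (m : Int) * ny = ny by ring,
        Int.sub_zero]
      apply List.map_congr_left
      intro r hr
      simp only [List.mem_range] at hr
      have hrlt : (r : Int) < ny := by
        have := Int.toNat_of_nonneg (le_of_lt hny); omega
      have hr0 : (0 : Int) ≤ (r : Int) := by positivity
      have hdiv : PySem.Int.floordiv ((m : Int) * ny + r) ny = m := by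
        rw [PySem.Int.floordiv_eq_iff_of_pos hny]
        constructor <;> nlinarith
      have hmod : PySem.Int.mod ((m : Int) * ny + r) ny = r := by
        have hb := PySem.Int.floordiv_mul_add_mod ((m : Int) * ny + r) ny
        rw [hdiv] at hb; omega
      simp [hdiv, hmod]

-- B as the same nested flatMap, with unclamped pairs
theorem alt_eq_flatMap (w h sw sh : Int) :
    get_grid_coords_alt w h sw sh
      = (PySem.List.pyRange 0 (PySem.Int.floordiv w sw) 1).flatMap fun i =>
          (PySem.List.pyRange 0 (PySem.Int.floordiv h sh) 1).map fun j =>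
            [sw * i, sh * j, sw * (i + 1), sh * (j + 1)] := by
  unfold get_grid_coords_alt
  set nx := PySem.Int.floordiv w sw with hnx
  set ny := PySem.Int.floordiv h sh with hny
  by_cases hc : nx ≤ 0 ∨ ny ≤ 0
  · rw [if_pos hc]
    rcases hc with hc | hc
    · rw [PySem.List.pyRange_one_eq_nil hc]; simp
    · rw [PySem.List.pyRange_one_eq_nil hc]; simp [List.flatMap]
  · rw [if_neg hc]
    push_neg at hc
    obtain ⟨hx, hy⟩ := hc
    rw [PySem.List.foldl_append_singleton_eq_map]
    have hxe : nx = ((nx.toNat : Nat) : Int) := by omega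
    rw [List.nil_append, hxe]
    exact grid_flat ny hy (fun i j => [sw * i, sh * j, sw * (i + 1), sh * (j + 1)]) nx.toNat

-- the range is nonempty iff the slice count is ≥ 1, characterised on the inputs
theorem count_pos_iff (w s : Int) (hs : s ≠ 0) :
    1 ≤ PySem.Int.floordiv w s ↔ ((0 < s ∧ s ≤ w) ∨ (s < 0 ∧ w ≤ s)) := by
  rcases lt_trichotomy s 0 with hneg | hz | hpos
  · have hb := PySem.Int.floordiv_mul_add_mod w s
    have hm := PySem.Int.mod_neg_bounds w hneg
    constructor
    · intro h1
      refine Or.inr ⟨hneg, ?_⟩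
      nlinarith [hb, hm.1, hm.2]
    · rintro (⟨hp, _⟩ | ⟨_, hws⟩)
      · omega
      · by_contra hlt
        have hlt2 := not_le.mp hlt
        nlinarith [hb, hm.1, hm.2, hlt2]
  · omega
  · rw [PySem.Int.le_floordiv_iff_mul_le hpos]
    constructor
    · intro h; exact Or.inl ⟨hpos, by omega⟩
    · rintro (⟨_, hsw⟩ | ⟨hn, _⟩) <;> omega

-- the clamp never fires on indices of the range, unless s is negative and strictly above w
theorem noclamp (w s i : Int) (hs : s ≠ 0) (hdx : ¬(s < 0 ∧ w < s))
    (h0 : 0 ≤ i) (hi : i < PySem.Int.floordiv w s) : ¬ (s * (i + 1) > w) := by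
  rcases lt_trichotomy s 0 with hneg | hz | hpos
  · have hsw : s ≤ w := by
      rcases not_and_or.mp hdx with h | h
      · omega
      · omega
    have hb := PySem.Int.floordiv_mul_add_mod w s
    have hm := PySem.Int.mod_neg_bounds w hneg
    have hn1 : PySem.Int.floordiv w s = 1 := by nlinarith [hb, hm.1, hm.2]
    have : i = 0 := by omega
    subst this
    simp
    omega
  · omega
  · have h1 : i + 1 ≤ PySem.Int.floordiv w s := by omega
    have := (PySem.Int.le_floordiv_iff_mul_le hpos).mp h1
    nlinarith

-- ===== VERDICT (by name: the statement is the Claim_ definition above) =====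
theorem get_grid_coords_spec : Claim_unchanged_get_grid_coords := by
  intro w h sw sh _ hpre
  intro hnD
  obtain ⟨hsw, hsh⟩ := hpre
  rw [get_grid_coords_eq_flatMap, alt_eq_flatMap]
  by_cases hr : PySem.List.pyRange 0 (PySem.Int.floordiv w sw) 1 = []
  · simp [hr]
  · by_cases hry : PySem.List.pyRange 0 (PySem.Int.floordiv h sh) 1 = []
    · simp [hry, List.flatMap]
    · obtain ⟨x, hx⟩ := List.exists_mem_of_ne_nil _ hr
      obtain ⟨y, hy⟩ := List.exists_mem_of_ne_nil _ hry
      rw [PySem.List.mem_pyRange_one] at hx hy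
      have hcx : (0 < sw ∧ sw ≤ w) ∨ (sw < 0 ∧ w ≤ sw) :=
        (count_pos_iff w sw hsw).mp (by omega)
      have hcy : (0 < sh ∧ sh ≤ h) ∨ (sh < 0 ∧ h ≤ sh) :=
        (count_pos_iff h sh hsh).mp (by omega)
      unfold D_get_grid_coords at hnD
      have hcount : 1 ≤ PySem.Int.floordiv w sw ∧ 1 ≤ PySem.Int.floordiv h sh :=
        ⟨(count_pos_iff w sw hsw).mpr hcx, (count_pos_iff h sh hsh).mpr hcy⟩
      have hdx : ¬(sw < 0 ∧ w < sw) := fun hh => hnD ⟨hcount, Or.inl hh⟩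
      have hdy : ¬(sh < 0 ∧ h < sh) := fun hh => hnD ⟨hcount, Or.inr hh⟩
      apply List.flatMap_congr
      intro i hi
      rw [PySem.List.mem_pyRange_one] at hi
      apply List.map_congr_left
      intro j hj
      rw [PySem.List.mem_pyRange_one] at hj
      have hfi : pvF w sw i = (sw * i, sw * (i + 1)) := by
        unfold pvF; rw [if_neg (noclamp w sw i hsw hdx hi.1 hi.2)]
      have hfj : pvF h sh j = (sh * j, sh * (j + 1)) := by
        unfold pvF; rw [if_neg (noclamp h sh j hsh hdy hj.1 hj.2)]
      rw [hfi, hfj]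

theorem get_grid_coords_changed : Claim_changed_get_grid_coords := by
  unfold Claim_changed_get_grid_coords; decide

theorem get_grid_coords_tight : Claim_exact_get_grid_coords := by
  intro w h sw sh _ hpre hD
  obtain ⟨hsw, hsh⟩ := hpre
  obtain ⟨⟨hnx, hny⟩, hclamp⟩ := hD
  rw [get_grid_coords_eq_flatMap, alt_eq_flatMap]
  rw [PySem.List.pyRange_one_cons (show (0:Int) < PySem.Int.floordiv w sw by omega),
      PySem.List.pyRange_one_cons (show (0:Int) < PySem.Int.floordiv h sh by omega)]
  simp only [List.flatMap_cons, List.map_cons, List.cons_append]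
  intro hEq
  have hHead := (List.cons_eq_cons.mp hEq).1
  simp only [List.cons.injEq] at hHead
  by_cases hdx : sw < 0 ∧ w < sw
  · have hx0 : pvF w sw 0 = (w - sw, w) := by
      unfold pvF; rw [if_pos (by simpa using hdx.2)]
    rw [hx0] at hHead
    simp at hHead
    omega
  · have hdy : sh < 0 ∧ h < sh := by
      rcases hclamp with hx | hy
      · exact absurd hx hdx
      · exact hy
    have hx0 : pvF w sw 0 = (sw * 0, sw * (0 + 1)) := by
      unfold pvF
      rw [if_neg (noclamp w sw 0 hsw hdx le_rfl (by omega))]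
    have hy0 : pvF h sh 0 = (h - sh, h) := by
      unfold pvF; rw [if_pos (by simpa using hdy.2)]
    rw [hx0, hy0] at hHead
    simp at hHead
    omega
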